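-- pv_equiv track=rewrite | github.com/pkitslaar/AdventOfCode | 2019/day 24/day_24.py | compute_rating
-- ===== SOURCE A (Python) =====
-- def compute_rating(grid):
--     rating = 0
--     cell_index = 0
--     for row in grid:
--         for cell in row:
--             if cell == '#':
--                 rating += pow(2, cell_index)
--             cell_index += 1
--     return rating
-- ===== SOURCE B (Python) =====
-- def compute_rating(grid):
--     s = ''.join('1' if cell == '#' else '0' for row in grid for cell in row)
--     return int(s[::-1], 2) if s else 0
-- ===== Notes on version B (the rewrite author's own statement) =====
-- stated objective: idiomatic
-- what changed: Replaces the explicit rating/cell_index accumulator loop with building one row-major bit string and converting its reversal with int(s,2) (guarding the empty grid, where int('',2) would raise).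
import Mathlib
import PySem

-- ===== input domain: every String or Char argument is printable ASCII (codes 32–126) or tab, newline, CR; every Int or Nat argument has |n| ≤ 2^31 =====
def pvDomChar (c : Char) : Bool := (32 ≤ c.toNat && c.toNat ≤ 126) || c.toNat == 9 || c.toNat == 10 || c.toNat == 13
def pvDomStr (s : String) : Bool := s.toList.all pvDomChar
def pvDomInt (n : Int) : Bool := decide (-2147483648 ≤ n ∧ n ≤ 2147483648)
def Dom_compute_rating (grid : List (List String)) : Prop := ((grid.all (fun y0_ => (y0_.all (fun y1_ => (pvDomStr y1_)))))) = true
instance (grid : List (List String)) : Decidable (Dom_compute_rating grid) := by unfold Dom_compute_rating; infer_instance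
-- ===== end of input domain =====

-- B builds one row-major bit string and converts its reversal as a base-2 numeral (idiomatic; equal return value, not claimed faster).

-- ===== PORT A =====
-- state = (rating, cell_index); cell_index starts at 0 and only increments, kept as Nat
def compute_rating (grid : List (List String)) : Int :=
  (grid.foldl
    (fun st row =>
      row.foldl
        (fun st cell =>
          ((if cell = "#" then st.1 + 2 ^ st.2 else st.1), st.2 + 1))
        st)
    ((0 : Int), (0 : Nat))).1

-- ===== PORT B =====
-- the bit character for one cell ('1' if cell == '#' else '0')
def pvBitChar (cell : String) : Char := if cell = "#" then '1' else '0'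

-- int(s, 2) on a nonempty binary string: MSB-first fold (s here is already reversed)
def pvInt2 (s : List Char) : Int :=
  s.foldl (fun a c => 2 * a + (if c = '1' then 1 else 0)) 0

def compute_rating_alt (grid : List (List String)) : Int :=
  let s : List Char := grid.flatMap (fun row => row.map pvBitChar)
  if s = [] then 0 else pvInt2 s.reverse

-- ===== PRECONDITION & SPEC =====
def Spec_compute_rating (grid : List (List String)) (out : Int) : Prop := out = compute_rating_alt grid
instance (grid : List (List String)) (out : Int) : Decidable (Spec_compute_rating grid out) := by unfold Spec_compute_rating; infer_instance

-- ===== CLAIM (what is proved, stated in full; the proofs are below) =====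
def Claim_equal_compute_rating : Prop := ∀ (grid : List (List String)), Dom_compute_rating grid → Spec_compute_rating grid (compute_rating grid)

-- ===== LEMMAS AND PROOFS =====

-- value of an LSB-first bit-char list
def pvV (s : List Char) : Int := pvInt2 s.reverse

theorem pvV_nil : pvV [] = 0 := rfl

theorem pvV_cons (c : Char) (cs : List Char) :
    pvV (c :: cs) = 2 * pvV cs + (if c = '1' then 1 else 0) := by
  simp [pvV, pvInt2, List.foldl_append]

theorem pvV_append (xs ys : List Char) :
    pvV (xs ++ ys) = pvV xs + 2 ^ xs.length * pvV ys := by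
  induction xs with
  | nil => simp [pvV_nil]
  | cons x xs ih =>
      simp only [List.cons_append, pvV_cons, ih, List.length_cons]
      ring

theorem pvRow (row : List String) (r : Int) (i : Nat) :
    row.foldl (fun st cell => ((if cell = "#" then st.1 + 2 ^ st.2 else st.1), st.2 + 1)) (r, i)
      = (r + 2 ^ i * pvV (row.map pvBitChar), i + row.length) := by
  induction row generalizing r i with
  | nil => simp [pvV_nil]
  | cons c cs ih =>
      simp only [List.foldl_cons, ih, List.map_cons, pvV_cons, List.length_cons, Prod.mk.injEq]
      constructor
      · by_cases h : c = "#" <;> simp [h, pvBitChar, pow_succ] <;> ring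
      · omega

theorem pvGrid (grid : List (List String)) (r : Int) (i : Nat) :
    grid.foldl
      (fun st row =>
        row.foldl (fun st cell => ((if cell = "#" then st.1 + 2 ^ st.2 else st.1), st.2 + 1)) st)
      (r, i)
      = (r + 2 ^ i * pvV (grid.flatMap (fun row => row.map pvBitChar)),
         i + (grid.flatMap (fun row => row.map pvBitChar)).length) := by
  induction grid generalizing r i with
  | nil => simp [pvV_nil]
  | cons row rows ih =>
      simp only [List.foldl_cons, pvRow, ih, List.flatMap_cons, pvV_append, List.length_append,
        List.length_map, Prod.mk.injEq]
      constructor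
      · rw [pow_add]; ring
      · omega

-- ===== VERDICT (by name: the statement is the Claim_ definition above) =====
theorem compute_rating_spec : Claim_equal_compute_rating := by
  intro grid _
  unfold Spec_compute_rating compute_rating compute_rating_alt
  rw [pvGrid]
  by_cases h : grid.flatMap (fun row => row.map pvBitChar) = [] <;>
    simp [h, pvV]; rfl
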